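-- pv_equiv track=rewrite | github.com/Muhammadatef/Horus---See-Everything-in-Your-Data | backend/app/services/enhanced_llm_service.py | _determine_result_type
-- ===== SOURCE A (Python) =====
-- def _determine_result_type(question: str, intent: str) -> str:
--     """Determine what type of result the user expects"""
--
--     question_lower = question.lower()
--
--     if intent == "metrics":
--         if any(word in question_lower for word in ['how many', 'count', 'number of']):
--             return "single_number"
--         elif any(word in question_lower for word in ['sum', 'total', 'average', 'avg']):
--             return "single_value"
--
--     elif intent == "rankings":
--         if any(word in question_lower for word in ['top', 'best', 'worst']):
--             return "ranked_list"
--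
--     elif intent == "trends":
--         if any(word in question_lower for word in ['over time', 'trend', 'growth']):
--             return "time_series"
--
--     elif intent == "comparisons":
--         if any(word in question_lower for word in ['compare', 'vs', 'versus']):
--             return "comparison_chart"
--
--     # Default based on expected result size
--     if any(word in question_lower for word in ['show me', 'list', 'all']):
--         return "data_table"
--
--     return "summary"
-- ===== SOURCE B (Python) =====
-- # B: flatten everything (intent rules AND the shared default) into ONE ordered list of
-- # (intent_or_None, keyword, result_type) triples with one keyword per entry; the answer
-- # is the result_type of the first triple whose intent matches (None = wildcard) and whose
-- # keyword occurs in the lowercased question, else "summary".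
-- RULES = [
--     ("metrics", "how many", "single_number"),
--     ("metrics", "count", "single_number"),
--     ("metrics", "number of", "single_number"),
--     ("metrics", "sum", "single_value"),
--     ("metrics", "total", "single_value"),
--     ("metrics", "average", "single_value"),
--     ("metrics", "avg", "single_value"),
--     ("rankings", "top", "ranked_list"),
--     ("rankings", "best", "ranked_list"),
--     ("rankings", "worst", "ranked_list"),
--     ("trends", "over time", "time_series"),
--     ("trends", "trend", "time_series"),
--     ("trends", "growth", "time_series"),
--     ("comparisons", "compare", "comparison_chart"),
--     ("comparisons", "vs", "comparison_chart"),
--     ("comparisons", "versus", "comparison_chart"),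
--     (None, "show me", "data_table"),
--     (None, "list", "data_table"),
--     (None, "all", "data_table"),
-- ]
--
--
-- def _determine_result_type(question: str, intent: str) -> str:
--     q = question.lower()
--     return next((rt for it, kw, rt in RULES
--                  if (it is None or it == intent) and kw in q),
--                 "summary")
-- ===== Notes on version B (the rewrite author's own statement) =====
-- stated objective: idiomatic
-- what changed: A's nested if/elif branches plus a separate fall-through default are replaced by one flat ordered list of (intent-or-wildcard, single keyword, result) triples, with the defaults folded in as wildcard entries and the answer taken as the first matching triple in a single uniform scan.
import Mathlib
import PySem

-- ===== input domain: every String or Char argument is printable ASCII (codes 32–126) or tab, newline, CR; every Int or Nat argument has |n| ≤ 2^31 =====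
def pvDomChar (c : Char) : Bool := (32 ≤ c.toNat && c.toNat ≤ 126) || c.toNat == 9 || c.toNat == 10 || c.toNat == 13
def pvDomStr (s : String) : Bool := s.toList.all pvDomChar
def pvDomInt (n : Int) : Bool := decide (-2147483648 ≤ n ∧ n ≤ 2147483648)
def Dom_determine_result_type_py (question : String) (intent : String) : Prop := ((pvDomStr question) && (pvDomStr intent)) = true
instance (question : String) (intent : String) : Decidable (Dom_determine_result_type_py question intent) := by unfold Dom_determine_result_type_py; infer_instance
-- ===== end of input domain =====

-- B flattens A's nested if/elif branches and the separate fall-through default into one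
-- ordered list of (intent-or-wildcard, keyword, result) triples scanned uniformly once
-- (objective: idiomatic); same return value everywhere.

-- ===== PORT A =====
-- A's shared fall-through tail (the '# Default based on expected result size' code).
def pvDefaultA (question_lower : String) : String :=
  if (["show me", "list", "all"].any (fun word => PySem.Str.isIn word question_lower)) then
    "data_table"
  else
    "summary"

def determine_result_type_py (question : String) (intent : String) : String :=
  let question_lower := PySem.Str.lower question
  if intent == "metrics" then
    if (["how many", "count", "number of"].any (fun word => PySem.Str.isIn word question_lower)) then
      "single_number"
    else if (["sum", "total", "average", "avg"].any (fun word => PySem.Str.isIn word question_lower)) then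
      "single_value"
    else pvDefaultA question_lower
  else if intent == "rankings" then
    if (["top", "best", "worst"].any (fun word => PySem.Str.isIn word question_lower)) then
      "ranked_list"
    else pvDefaultA question_lower
  else if intent == "trends" then
    if (["over time", "trend", "growth"].any (fun word => PySem.Str.isIn word question_lower)) then
      "time_series"
    else pvDefaultA question_lower
  else if intent == "comparisons" then
    if (["compare", "vs", "versus"].any (fun word => PySem.Str.isIn word question_lower)) then
      "comparison_chart"
    else pvDefaultA question_lower
  else pvDefaultA question_lower

-- ===== PORT B =====
-- Source B's flat RULES list: (intent_or_None, keyword, result_type)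
def pvRulesB : List (Option String × String × String) :=
  [ (some "metrics", "how many", "single_number"),
    (some "metrics", "count", "single_number"),
    (some "metrics", "number of", "single_number"),
    (some "metrics", "sum", "single_value"),
    (some "metrics", "total", "single_value"),
    (some "metrics", "average", "single_value"),
    (some "metrics", "avg", "single_value"),
    (some "rankings", "top", "ranked_list"),
    (some "rankings", "best", "ranked_list"),
    (some "rankings", "worst", "ranked_list"),
    (some "trends", "over time", "time_series"),
    (some "trends", "trend", "time_series"),
    (some "trends", "growth", "time_series"),
    (some "comparisons", "compare", "comparison_chart"),
    (some "comparisons", "vs", "comparison_chart"),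
    (some "comparisons", "versus", "comparison_chart"),
    (none, "show me", "data_table"),
    (none, "list", "data_table"),
    (none, "all", "data_table") ]

-- Source B's generator: first rule whose intent matches (none = wildcard) and keyword occurs in q
def pvFirstRule (q : String) (intent : String) : List (Option String × String × String) → Option String
  | [] => none
  | (it, kw, rt) :: rest =>
    if (match it with | none => true | some s => s == intent) && PySem.Str.isIn kw q then
      some rt
    else pvFirstRule q intent rest

def determine_result_type_py_alt (question : String) (intent : String) : String :=
  let q := PySem.Str.lower question
  (pvFirstRule q intent pvRulesB).getD "summary"

-- ===== PRECONDITION & SPEC =====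
def Spec_determine_result_type_py (question : String) (intent : String) (out : String) : Prop := out = determine_result_type_py_alt question intent
instance (question : String) (intent : String) (out : String) : Decidable (Spec_determine_result_type_py question intent out) := by unfold Spec_determine_result_type_py; infer_instance

-- ===== CLAIM (what is proved, stated in full; the proofs are below) =====
def Claim_equal_determine_result_type_py : Prop := ∀ (question : String) (intent : String), Dom_determine_result_type_py question intent → Spec_determine_result_type_py question intent (determine_result_type_py question intent)

-- ===== LEMMAS AND PROOFS =====

-- ===== VERDICT (by name: the statement is the Claim_ definition above) =====
theorem determine_result_type_py_spec : Claim_equal_determine_result_type_py := by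
  intro question intent _
  show determine_result_type_py question intent = determine_result_type_py_alt question intent
  unfold determine_result_type_py determine_result_type_py_alt
  by_cases h1 : intent = "metrics"
  · subst h1
    simp only [pvRulesB, pvFirstRule, pvDefaultA, List.any_cons, List.any_nil, Bool.or_false,
      String.reduceBEq, beq_self_eq_true, Bool.true_and, Bool.false_and, Bool.false_eq_true,
      if_false, reduceIte]
    generalize PySem.Str.isIn "how many" (PySem.Str.lower question) = b1
    generalize PySem.Str.isIn "count" (PySem.Str.lower question) = b2
    generalize PySem.Str.isIn "number of" (PySem.Str.lower question) = b3
    generalize PySem.Str.isIn "sum" (PySem.Str.lower question) = b4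
    generalize PySem.Str.isIn "total" (PySem.Str.lower question) = b5
    generalize PySem.Str.isIn "average" (PySem.Str.lower question) = b6
    generalize PySem.Str.isIn "avg" (PySem.Str.lower question) = b7
    generalize PySem.Str.isIn "show me" (PySem.Str.lower question) = b8
    generalize PySem.Str.isIn "list" (PySem.Str.lower question) = b9
    generalize PySem.Str.isIn "all" (PySem.Str.lower question) = b10
    revert b1 b2 b3 b4 b5 b6 b7 b8 b9 b10
    decide
  · by_cases h2 : intent = "rankings"
    · subst h2
      simp only [pvRulesB, pvFirstRule, pvDefaultA, List.any_cons, List.any_nil, Bool.or_false,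
        String.reduceBEq, beq_self_eq_true, Bool.true_and, Bool.false_and, Bool.false_eq_true,
        if_false, reduceIte]
      generalize PySem.Str.isIn "top" (PySem.Str.lower question) = b1
      generalize PySem.Str.isIn "best" (PySem.Str.lower question) = b2
      generalize PySem.Str.isIn "worst" (PySem.Str.lower question) = b3
      generalize PySem.Str.isIn "show me" (PySem.Str.lower question) = b8
      generalize PySem.Str.isIn "list" (PySem.Str.lower question) = b9
      generalize PySem.Str.isIn "all" (PySem.Str.lower question) = b10
      revert b1 b2 b3 b8 b9 b10
      decide
    · by_cases h3 : intent = "trends"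
      · subst h3
        simp only [pvRulesB, pvFirstRule, pvDefaultA, List.any_cons, List.any_nil, Bool.or_false,
          String.reduceBEq, beq_self_eq_true, Bool.true_and, Bool.false_and, Bool.false_eq_true,
          if_false, reduceIte]
        generalize PySem.Str.isIn "over time" (PySem.Str.lower question) = b1
        generalize PySem.Str.isIn "trend" (PySem.Str.lower question) = b2
        generalize PySem.Str.isIn "growth" (PySem.Str.lower question) = b3
        generalize PySem.Str.isIn "show me" (PySem.Str.lower question) = b8
        generalize PySem.Str.isIn "list" (PySem.Str.lower question) = b9
        generalize PySem.Str.isIn "all" (PySem.Str.lower question) = b10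
        revert b1 b2 b3 b8 b9 b10
        decide
      · by_cases h4 : intent = "comparisons"
        · subst h4
          simp only [pvRulesB, pvFirstRule, pvDefaultA, List.any_cons, List.any_nil, Bool.or_false,
            String.reduceBEq, beq_self_eq_true, Bool.true_and, Bool.false_and, Bool.false_eq_true,
            if_false, reduceIte]
          generalize PySem.Str.isIn "compare" (PySem.Str.lower question) = b1
          generalize PySem.Str.isIn "vs" (PySem.Str.lower question) = b2
          generalize PySem.Str.isIn "versus" (PySem.Str.lower question) = b3
          generalize PySem.Str.isIn "show me" (PySem.Str.lower question) = b8
          generalize PySem.Str.isIn "list" (PySem.Str.lower question) = b9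
          generalize PySem.Str.isIn "all" (PySem.Str.lower question) = b10
          revert b1 b2 b3 b8 b9 b10
          decide
        · have e1 : ("metrics" == intent) = false := beq_eq_false_iff_ne.mpr (Ne.symm h1)
          have e2 : ("rankings" == intent) = false := beq_eq_false_iff_ne.mpr (Ne.symm h2)
          have e3 : ("trends" == intent) = false := beq_eq_false_iff_ne.mpr (Ne.symm h3)
          have e4 : ("comparisons" == intent) = false := beq_eq_false_iff_ne.mpr (Ne.symm h4)
          have f1 : (intent == "metrics") = false := beq_eq_false_iff_ne.mpr h1
          have f2 : (intent == "rankings") = false := beq_eq_false_iff_ne.mpr h2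
          have f3 : (intent == "trends") = false := beq_eq_false_iff_ne.mpr h3
          have f4 : (intent == "comparisons") = false := beq_eq_false_iff_ne.mpr h4
          simp only [pvRulesB, pvFirstRule, pvDefaultA, e1, e2, e3, e4, f1, f2, f3, f4,
            List.any_cons, List.any_nil, Bool.or_false, Bool.false_and, Bool.true_and,
            Bool.false_eq_true, if_false]
          generalize PySem.Str.isIn "show me" (PySem.Str.lower question) = b8
          generalize PySem.Str.isIn "list" (PySem.Str.lower question) = b9
          generalize PySem.Str.isIn "all" (PySem.Str.lower question) = b10
          revert b8 b9 b10
          decide
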